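-- pv_equiv track=rewrite | github.com/ddlandim/SoftwareTesting | KissFrame/ncbr2/KissFrame.py | kiss_unescape
-- ===== SOURCE A (Python) =====
-- import string
--
-- def valid_hex_digits(A):
--     if(len(A) % 2 != 0):
--       return False
--     for _char in A:
--         if _char not in string.hexdigits:
--             return False
--     return True
--
-- def kiss_unescape(A):
--   A=A.lower()
--   if not valid_hex_digits(A):
--     return "HEX_DATA_INVALID"
--   unescaped = ""
--   while len(A) > 0:
--     if len(A) >= 4 and (A[0] + A[1] + A[2] + A[3]) == "dbdc":
--       unescaped += "c0"
--       A = A[4:]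
--     elif len(A) >= 4 and (A[0] + A[1] + A[2] + A[3]) == "dbdd":
--       unescaped += "dc"
--       A = A[4:]
--     else:
--       unescaped += (A[0] + A[1])
--       A = A[2:]
--   return unescaped
-- ===== SOURCE B (Python) =====
-- import string
--
-- def kiss_unescape(A):
--     A = A.lower()
--     if len(A) % 2 != 0 or any(c not in string.hexdigits for c in A):
--         return "HEX_DATA_INVALID"
--     out = []
--     pending = False  # a 'db' byte has been seen and not yet resolved
--     for i in range(0, len(A), 2):
--         b = A[i:i+2]
--         if pending:
--             if b == "dc":
--                 out.append("c0")
--                 pending = False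
--             elif b == "dd":
--                 out.append("dc")
--                 pending = False
--             elif b == "db":
--                 out.append("db")   # previous 'db' is literal; current one pends
--             else:
--                 out.append("db")
--                 out.append(b)
--                 pending = False
--         elif b == "db":
--             pending = True
--         else:
--             out.append(b)
--     if pending:
--         out.append("db")
--     return "".join(out)
-- ===== Notes on version B (the rewrite author's own statement) =====
-- stated objective: faster
-- what changed: Replaces A's 4-char lookahead with repeated string re-slicing/concatenation by a single linear per-byte pass over 2-char chunks carrying a pending-escape state flag, flushed after the loop.
import Mathlib
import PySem

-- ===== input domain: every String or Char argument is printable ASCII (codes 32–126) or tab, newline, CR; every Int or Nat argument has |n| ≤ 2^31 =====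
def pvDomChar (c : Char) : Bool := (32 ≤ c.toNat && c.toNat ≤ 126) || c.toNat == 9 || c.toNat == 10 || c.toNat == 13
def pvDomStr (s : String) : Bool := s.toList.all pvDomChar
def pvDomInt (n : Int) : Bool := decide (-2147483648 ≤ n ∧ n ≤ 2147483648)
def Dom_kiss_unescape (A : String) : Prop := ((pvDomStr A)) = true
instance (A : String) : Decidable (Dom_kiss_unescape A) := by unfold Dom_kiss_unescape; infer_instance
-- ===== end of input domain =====

-- B replaces A's 4-char lookahead window over a repeatedly re-sliced string by one
-- per-byte (2-char chunk) pass carrying a pending-'db' flag (objective: alternative).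

-- ===== PORT A =====
-- string.hexdigits
def pvHexdigits : List Char := "0123456789abcdefABCDEF".toList

-- Python's for-loop with early `return False` == List.all
def valid_hex_digits (A : List Char) : Bool :=
  if A.length % 2 ≠ 0 then false
  else A.all (fun c => pvHexdigits.contains c)

-- A's while loop; the final [a] case is unreachable after validation
-- (Python would raise IndexError there), value chosen arbitrarily.
def kissLoopA : List Char → List Char
  | [] => []
  | a :: b :: c :: d :: rest =>
      if a = 'd' ∧ b = 'b' ∧ c = 'd' ∧ d = 'c' then 'c' :: '0' :: kissLoopA rest
      else if a = 'd' ∧ b = 'b' ∧ c = 'd' ∧ d = 'd' then 'd' :: 'c' :: kissLoopA rest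
      else a :: b :: kissLoopA (c :: d :: rest)
  | a :: b :: rest => a :: b :: kissLoopA rest
  | [a] => [a]

def kiss_unescape (A : String) : String :=
  let l := (PySem.Str.lower A).toList
  if ¬ valid_hex_digits l then "HEX_DATA_INVALID"
  else String.ofList (kissLoopA l)

-- ===== PORT B =====
-- Source B's per-chunk loop; the Bool is the `pending` flag, flushed at the end.
-- The [a] case (odd length) is unreachable after validation.
def kissLoopB : List Char → Bool → List Char
  | [], pending => if pending then ['d', 'b'] else []
  | a :: b :: rest, pending =>
      if pending then
        if a = 'd' ∧ b = 'c' then 'c' :: '0' :: kissLoopB rest false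
        else if a = 'd' ∧ b = 'd' then 'd' :: 'c' :: kissLoopB rest false
        else if a = 'd' ∧ b = 'b' then 'd' :: 'b' :: kissLoopB rest true
        else 'd' :: 'b' :: a :: b :: kissLoopB rest false
      else if a = 'd' ∧ b = 'b' then kissLoopB rest true
      else a :: b :: kissLoopB rest false
  | [a], pending => if pending then ['d', 'b', a] else [a]

def kiss_unescape_alt (A : String) : String :=
  let l := (PySem.Str.lower A).toList
  if l.length % 2 ≠ 0 ∨ ¬ l.all (fun c => pvHexdigits.contains c) then "HEX_DATA_INVALID"
  else String.ofList (kissLoopB l false)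

-- ===== PRECONDITION & SPEC =====
def Spec_kiss_unescape (A : String) (out : String) : Prop := out = kiss_unescape_alt A
instance (A : String) (out : String) : Decidable (Spec_kiss_unescape A out) := by unfold Spec_kiss_unescape; infer_instance

-- ===== CLAIM (what is proved, stated in full; the proofs are below) =====
def Claim_equal_kiss_unescape : Prop := ∀ (A : String), Dom_kiss_unescape A → Spec_kiss_unescape A (kiss_unescape A)

-- ===== LEMMAS AND PROOFS =====

-- A's loop on a non-"db" leading byte just emits it, whatever follows.
theorem kissLoopA_cons (a b : Char) (rest : List Char) (h : ¬(a = 'd' ∧ b = 'b')) :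
    kissLoopA (a :: b :: rest) = a :: b :: kissLoopA rest := by
  match rest with
  | [] => rfl
  | [c] => rfl
  | c :: d :: rest' =>
      rw [kissLoopA]
      rw [if_neg (by tauto), if_neg (by tauto)]

theorem loop_eq (n : Nat) : ∀ l : List Char, l.length ≤ n →
    kissLoopB l false = kissLoopA l ∧ kissLoopB l true = kissLoopA ('d' :: 'b' :: l) := by
  induction n with
  | zero =>
      intro l hl
      have : l = [] := List.eq_nil_of_length_eq_zero (Nat.le_zero.mp hl)
      subst this; exact ⟨rfl, rfl⟩
  | succ n ih =>
      intro l hl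
      match l with
      | [] => exact ⟨rfl, rfl⟩
      | [a] => exact ⟨rfl, rfl⟩
      | a :: b :: rest =>
          have hr : rest.length ≤ n := by
            simp only [List.length_cons] at hl; omega
          obtain ⟨ihF, ihT⟩ := ih rest hr
          constructor
          · rw [kissLoopB]
            by_cases hdb : a = 'd' ∧ b = 'b'
            · obtain ⟨ha, hb⟩ := hdb; subst ha; subst hb
              rw [if_neg Bool.false_ne_true, if_pos ⟨rfl, rfl⟩, ihT]
            · rw [if_neg Bool.false_ne_true, if_neg hdb, ihF, kissLoopA_cons a b rest hdb]
          · rw [kissLoopB]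
            by_cases hc : a = 'd' ∧ b = 'c'
            · obtain ⟨ha, hb⟩ := hc; subst ha; subst hb
              rw [if_pos rfl, if_pos ⟨rfl, rfl⟩, kissLoopA, if_pos ⟨rfl, rfl, rfl, rfl⟩, ihF]
            · by_cases hd : a = 'd' ∧ b = 'd'
              · obtain ⟨ha, hb⟩ := hd; subst ha; subst hb
                rw [if_pos rfl, if_neg (by simp), if_pos ⟨rfl, rfl⟩, kissLoopA,
                  if_neg (by simp), if_pos ⟨rfl, rfl, rfl, rfl⟩, ihF]
              · have hA : kissLoopA ('d' :: 'b' :: a :: b :: rest)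
                    = 'd' :: 'b' :: kissLoopA (a :: b :: rest) := by
                  rw [kissLoopA, if_neg (by tauto), if_neg (by tauto)]
                by_cases hdb : a = 'd' ∧ b = 'b'
                · obtain ⟨ha, hb⟩ := hdb; subst ha; subst hb
                  rw [if_pos rfl, if_neg (by simp), if_neg (by simp), if_pos ⟨rfl, rfl⟩,
                    hA, ihT]
                · rw [if_pos rfl, if_neg hc, if_neg hd, if_neg hdb, hA,
                    kissLoopA_cons a b rest hdb, ihF]

theorem valid_eq (l : List Char) :
    (l.length % 2 ≠ 0 ∨ ¬ l.all (fun c => pvHexdigits.contains c)) ↔ ¬ valid_hex_digits l = true := by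
  unfold valid_hex_digits
  by_cases h : l.length % 2 ≠ 0 <;> simp [h]

-- ===== VERDICT (by name: the statement is the Claim_ definition above) =====
theorem kiss_unescape_spec : Claim_equal_kiss_unescape := by
  intro A _
  unfold Spec_kiss_unescape kiss_unescape kiss_unescape_alt
  set l := (PySem.Str.lower A).toList with hldef
  by_cases hv : valid_hex_digits l = true
  · rw [if_neg (by simpa using hv), if_neg ((valid_eq l).not_left.mpr (by simpa using hv))]
    exact congrArg String.ofList ((loop_eq l.length l le_rfl).1).symm
  · rw [if_pos (by simpa using hv), if_pos ((valid_eq l).mpr hv)]
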